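-- pv_equiv track=rewrite | github.com/Jhon-Ross/Jhon.BOT | bot-jhon/cogs/tickets.py | _normalize_channel_name
-- ===== SOURCE A (Python) =====
-- def _normalize_channel_name(name: str) -> str:
--     name = (name or "").strip().lower()
--     safe = []
--     for ch in name:
--         if ch.isalnum():
--             safe.append(ch)
--         elif ch in {" ", "_", "-"}:
--             safe.append("-")
--     value = "".join(safe).strip("-")
--     while "--" in value:
--         value = value.replace("--", "-")
--     return value[:80] or "usuario"
-- ===== SOURCE B (Python) =====
-- def _normalize_channel_name(name: str) -> str:
--     out = []
--     for ch in (name or "").strip().lower():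
--         if ch.isalnum():
--             out.append(ch)
--         elif ch in " _-" and out and out[-1] != "-":
--             out.append("-")
--     return "".join(out).strip("-")[:80] or "usuario"
-- ===== Notes on version B (the rewrite author's own statement) =====
-- stated objective: simpler
-- what changed: A collects every separator as a dash, strips the result, then repeatedly rescans it replacing doubled dashes until none remain; B makes a single left-to-right pass that emits a dash only when the output is nonempty and does not already end in a dash, so no collapse rescan loop exists.
import Mathlib
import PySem

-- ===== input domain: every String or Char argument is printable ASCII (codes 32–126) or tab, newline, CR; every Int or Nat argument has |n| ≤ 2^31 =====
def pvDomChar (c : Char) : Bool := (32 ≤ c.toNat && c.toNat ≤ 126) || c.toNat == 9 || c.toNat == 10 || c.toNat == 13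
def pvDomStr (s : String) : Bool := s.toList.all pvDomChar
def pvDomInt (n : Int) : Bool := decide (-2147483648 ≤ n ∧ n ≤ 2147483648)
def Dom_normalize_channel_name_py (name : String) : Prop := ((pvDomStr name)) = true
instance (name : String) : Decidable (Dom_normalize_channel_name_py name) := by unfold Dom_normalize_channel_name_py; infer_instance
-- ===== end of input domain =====

-- B replaces A's build-then-rescan pipeline (collect all separators as dashes, then a rescanning
-- collapse loop) by a single left-to-right pass that never emits a leading or doubled dash; objective: simpler.

-- ===== PORT A =====
-- the for-loop of A: safe.append(ch) / safe.append("-") on the same accumulator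
def pvFoldA (acc : List Char) : List Char → List Char
  | [] => acc
  | c :: t =>
    if PySem.Chars.isalnum c then pvFoldA (acc ++ [c]) t
    else if c = ' ' ∨ c = '_' ∨ c = '-' then pvFoldA (acc ++ ['-']) t  -- ch in {" ", "_", "-"}: literal membership
    else pvFoldA acc t

-- hand port of `"--" in value` for the fixed pattern "--": true iff two adjacent dashes exist (exact)
def pvHasDD : List Char → Bool
  | '-' :: '-' :: _ => true
  | _ :: t => pvHasDD t
  | [] => false

-- hand port of `value.replace("--", "-")`: Python's left-to-right non-overlapping replace, exact for this fixed pattern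
def pvRepDD : List Char → List Char
  | '-' :: '-' :: t => '-' :: pvRepDD t
  | c :: t => c :: pvRepDD t
  | [] => []

theorem pvRepDD_length_le (v : List Char) : (pvRepDD v).length ≤ v.length := by
  fun_induction pvRepDD v <;> simp_all <;> omega

theorem pvRepDD_length_lt (v : List Char) (h : pvHasDD v = true) :
    (pvRepDD v).length < v.length := by
  fun_induction pvRepDD v with
  | case1 t _ => have := pvRepDD_length_le t; simp; omega
  | case2 c t _ ih => simp_all [pvHasDD]
  | case3 => simp [pvHasDD] at h

-- the `while "--" in value:` loop of A
def pvCollapseLoop (v : List Char) : List Char :=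
  if h : pvHasDD v = true then pvCollapseLoop (pvRepDD v) else v
termination_by v.length
decreasing_by exact pvRepDD_length_lt v h

def normalize_channel_name_py (name : String) : String :=
  -- (name or "") = name on strings; .strip().lower()
  let s := PySem.Chars.lower (PySem.Chars.strip name.toList)
  let safe := pvFoldA [] s
  -- "".join(safe) of one-char pieces is the char list itself; .strip("-")
  let value := PySem.Chars.stripChars safe ['-']
  let value := pvCollapseLoop value
  let r := PySem.List.slice value none (some 80)
  if r = [] then "usuario" else String.ofList r

-- ===== PORT B =====
-- B's single loop: append ch, or "-" when out is nonempty and out[-1] != "-"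
def pvFoldB (acc : List Char) : List Char → List Char
  | [] => acc
  | c :: t =>
    if PySem.Chars.isalnum c then pvFoldB (acc ++ [c]) t
    else if (c = ' ' ∨ c = '_' ∨ c = '-') ∧ acc ≠ [] ∧ PySem.List.pyGet? acc (-1) ≠ some '-' then
      pvFoldB (acc ++ ['-']) t
    else pvFoldB acc t

def normalize_channel_name_py_alt (name : String) : String :=
  let s := PySem.Chars.lower (PySem.Chars.strip name.toList)
  let out := pvFoldB [] s
  let value := PySem.Chars.stripChars out ['-']
  let r := PySem.List.slice value none (some 80)
  if r = [] then "usuario" else String.ofList r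

-- ===== PRECONDITION & SPEC =====
def Spec_normalize_channel_name_py (name : String) (out : String) : Prop := out = normalize_channel_name_py_alt name
instance (name : String) (out : String) : Decidable (Spec_normalize_channel_name_py name out) := by unfold Spec_normalize_channel_name_py; infer_instance

-- ===== CLAIM (what is proved, stated in full; the proofs are below) =====
def Claim_equal_normalize_channel_name_py : Prop := ∀ (name : String), Dom_normalize_channel_name_py name → Spec_normalize_channel_name_py name (normalize_channel_name_py name)

-- ===== LEMMAS AND PROOFS =====

-- proof-side pure recursions
def pvIsD (c : Char) : Bool := List.contains ['-'] c

def pvLstrip (v : List Char) : List Char := v.dropWhile pvIsD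

def pvRstrip (v : List Char) : List Char := (v.reverse.dropWhile pvIsD).reverse

theorem pvStripChars_eq (v : List Char) :
    PySem.Chars.stripChars v ['-'] = pvRstrip (pvLstrip v) := rfl

-- the spec of A's loop: the mapped list
def pvMapA : List Char → List Char
  | [] => []
  | c :: t =>
    if PySem.Chars.isalnum c then c :: pvMapA t
    else if c = ' ' ∨ c = '_' ∨ c = '-' then '-' :: pvMapA t
    else pvMapA t

-- collapse consecutive dashes, keeping one
def pvDD : List Char → List Char
  | [] => []
  | [c] => [c]
  | a :: b :: t => if a = '-' ∧ b = '-' then pvDD (b :: t) else a :: pvDD (b :: t)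

-- B's collapse pass on the mapped list; the Bool is "a dash may be emitted now"
def pvG : List Char → Bool → List Char
  | [], _ => []
  | c :: t, b => if c = '-' then (if b then '-' :: pvG t false else pvG t b) else c :: pvG t true

def pvFlag (acc : List Char) : Bool := !acc.isEmpty && !(acc.getLast? == some '-')

theorem pvIsalnum_ne_dash (c : Char) (h : PySem.Chars.isalnum c = true) : c ≠ '-' := by
  intro hc; subst hc; revert h; decide

theorem pvFoldA_eq (t acc : List Char) : pvFoldA acc t = acc ++ pvMapA t := by
  induction t generalizing acc with
  | nil => simp [pvFoldA, pvMapA]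
  | cons c t ih =>
    by_cases h1 : PySem.Chars.isalnum c
    · simp [pvFoldA, pvMapA, h1, ih]
    · by_cases h2 : c = ' ' ∨ c = '_' ∨ c = '-' <;> simp [pvFoldA, pvMapA, h1, h2, ih]

theorem pvFlag_iff (acc : List Char) :
    (acc ≠ [] ∧ PySem.List.pyGet? acc (-1) ≠ some '-') ↔ pvFlag acc = true := by
  cases acc with
  | nil => simp [pvFlag]
  | cons a u =>
    have hget : PySem.List.pyGet? (a :: u) (-1) = (a :: u).getLast? := by
      have hlen : (0:Int) < ((a :: u).length : Int) := by simp
      simp only [PySem.List.pyGet?, PySem.List.pyIdx?]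
      rw [if_neg (by omega), if_pos (by omega)]
      simp [List.getLast?_eq_getElem?]
    rw [pvFlag, hget]
    cases h : (a :: u).getLast? with
    | none => simp [List.getLast?_eq_getElem?] at h
    | some x => by_cases hx : x = '-' <;> simp [hx]

theorem pvFlag_append (acc : List Char) (c : Char) :
    pvFlag (acc ++ [c]) = !(c == '-') := by
  simp [pvFlag]

theorem pvFoldB_eq (t acc : List Char) :
    pvFoldB acc t = acc ++ pvG (pvMapA t) (pvFlag acc) := by
  induction t generalizing acc with
  | nil => simp [pvFoldB, pvMapA, pvG]
  | cons c t ih =>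
    by_cases h1 : PySem.Chars.isalnum c
    · have hc : c ≠ '-' := pvIsalnum_ne_dash c h1
      rw [show pvFoldB acc (c :: t) = pvFoldB (acc ++ [c]) t by simp [pvFoldB, h1], ih,
          pvFlag_append]
      have hb : (!(c == '-')) = true := by simp [hc]
      rw [hb]
      simp [pvMapA, h1, pvG, hc]
    · by_cases h2 : c = ' ' ∨ c = '_' ∨ c = '-'
      · by_cases h3 : pvFlag acc = true
        · have hcond : (c = ' ' ∨ c = '_' ∨ c = '-') ∧ acc ≠ [] ∧ PySem.List.pyGet? acc (-1) ≠ some '-' :=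
            ⟨h2, ((pvFlag_iff acc).2 h3)⟩
          rw [show pvFoldB acc (c :: t) = pvFoldB (acc ++ ['-']) t by simp [pvFoldB, h1, hcond], ih,
              pvFlag_append]
          simp [pvMapA, h1, h2, pvG, h3]
        · have hcond : ¬ ((c = ' ' ∨ c = '_' ∨ c = '-') ∧ acc ≠ [] ∧ PySem.List.pyGet? acc (-1) ≠ some '-') := by
            intro hx; exact h3 ((pvFlag_iff acc).1 ⟨hx.2.1, hx.2.2⟩)
          rw [show pvFoldB acc (c :: t) = pvFoldB acc t by simp [pvFoldB, h1, hcond], ih]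
          have h3' : pvFlag acc = false := by simpa using h3
          simp [pvMapA, h1, h2, pvG, h3']
      · rw [show pvFoldB acc (c :: t) = pvFoldB acc t by
              simp [pvFoldB, h1]; intro hx; exact absurd hx h2, ih]
        simp [pvMapA, h1, h2]

theorem pvRstrip_cons (c : Char) (u : List Char) :
    pvRstrip (c :: u) = if c = '-' ∧ pvRstrip u = [] then [] else c :: pvRstrip u := by
  simp only [pvRstrip, List.reverse_cons, List.dropWhile_append]
  by_cases h : u.reverse.dropWhile pvIsD = [] <;> by_cases hc : c = '-' <;>
  simp [h, hc, pvIsD, List.dropWhile]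

theorem pvRstrip_eq_nil_iff (u : List Char) : pvRstrip u = [] ↔ ∀ x ∈ u, x = '-' := by
  simp [pvRstrip, List.dropWhile_eq_nil_iff, pvIsD]

theorem pvLstrip_eq_nil_iff (u : List Char) : pvLstrip u = [] ↔ ∀ x ∈ u, x = '-' := by
  simp [pvLstrip, List.dropWhile_eq_nil_iff, pvIsD]

theorem pvStrip_comm (t : List Char) : pvLstrip (pvRstrip t) = pvRstrip (pvLstrip t) := by
  induction t with
  | nil => rfl
  | cons c t ih =>
    by_cases hc : c = '-'
    · subst hc
      rw [pvRstrip_cons]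
      by_cases h : pvRstrip t = []
      · rw [if_pos (And.intro rfl h)]
        have : pvLstrip ('-' :: t) = pvLstrip t := by simp [pvLstrip, List.dropWhile, pvIsD]
        rw [this, ← ih]
        have h2 : pvLstrip t = [] := by
          rw [pvLstrip_eq_nil_iff]; exact (pvRstrip_eq_nil_iff t).1 h
        rw [h]
      · rw [if_neg (by simp [h])]
        have hl : pvLstrip ('-' :: pvRstrip t) = pvLstrip (pvRstrip t) := by
          simp [pvLstrip, List.dropWhile, pvIsD]
        have hl2 : pvLstrip ('-' :: t) = pvLstrip t := by
          simp [pvLstrip, List.dropWhile, pvIsD]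
        rw [hl, hl2, ih]
    · have hl : pvLstrip (c :: t) = c :: t := by
        simp [pvLstrip, List.dropWhile, pvIsD, hc]
      rw [hl, pvRstrip_cons, if_neg (by simp [hc])]
      simp [pvLstrip, List.dropWhile, pvIsD, hc]

theorem pvDD_cons_ne (c : Char) (u : List Char) (hc : c ≠ '-') :
    pvDD (c :: u) = c :: pvDD u := by
  cases u with
  | nil => rfl
  | cons d t => simp [pvDD, hc]

theorem pvDD_ne_nil (c : Char) (u : List Char) : pvDD (c :: u) ≠ [] := by
  induction u generalizing c with
  | nil => simp [pvDD]
  | cons d t ih =>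
    by_cases h : c = '-' ∧ d = '-'
    · simpa [pvDD, h] using ih d
    · simp [pvDD, h]

theorem pvLemL (u : List Char) (h : pvLstrip u ≠ []) :
    pvDD ('-' :: u) = '-' :: pvDD (pvLstrip u) := by
  induction u with
  | nil => simp [pvLstrip] at h
  | cons c t ih =>
    by_cases hc : c = '-'
    · subst hc
      have hl : pvLstrip ('-' :: t) = pvLstrip t := by simp [pvLstrip, List.dropWhile, pvIsD]
      rw [hl] at h ⊢
      rw [← ih h]
      simp [pvDD]
    · have hl : pvLstrip (c :: t) = c :: t := by simp [pvLstrip, List.dropWhile, pvIsD, hc]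
      rw [hl]
      simp [pvDD, hc]

theorem pvG_false_no_lead' (v : List Char) : pvLstrip (pvG v false) = pvG v false := by
  induction v with
  | nil => rfl
  | cons c t ih =>
    by_cases hc : c = '-'
    · simpa [pvG, hc] using ih
    · simp [pvG, hc, pvLstrip, pvIsD]

theorem pvLstrip_rstrip_ne_nil (t : List Char) (h : pvRstrip t ≠ []) :
    pvLstrip (pvRstrip t) ≠ [] := by
  rw [pvStrip_comm]
  intro hz
  apply h
  rw [pvRstrip_eq_nil_iff] at hz ⊢
  intro x hx
  rcases List.mem_append.1 (by rw [List.takeWhile_append_dropWhile (p := pvIsD) (l := t)]; exact hx) with hm | hm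
  · have := List.mem_takeWhile_imp hm
    simpa [pvIsD] using this
  · exact hz x hm

theorem pvPQ (v : List Char) :
    pvDD (pvRstrip (pvLstrip v)) = pvRstrip (pvG v false) ∧
    pvDD (pvRstrip v) = pvRstrip (pvG v true) := by
  induction v with
  | nil => exact ⟨rfl, rfl⟩
  | cons c t ih =>
    by_cases hc : c = '-'
    · subst hc
      constructor
      · have hl : pvLstrip ('-' :: t) = pvLstrip t := by simp [pvLstrip, List.dropWhile, pvIsD]
        have hg : pvG ('-' :: t) false = pvG t false := by simp [pvG]
        rw [hl, hg]; exact ih.1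
      · have hg : pvG ('-' :: t) true = '-' :: pvG t false := by simp [pvG]
        rw [hg, pvRstrip_cons, pvRstrip_cons]
        by_cases h : pvRstrip t = []
        · have hlt : pvLstrip t = [] := by
            rw [pvLstrip_eq_nil_iff]; exact (pvRstrip_eq_nil_iff t).1 h
          have : pvRstrip (pvG t false) = [] := by
            rw [← ih.1, hlt]; rfl
          simp [h, this, pvDD]
        · have hne : pvLstrip (pvRstrip t) ≠ [] := pvLstrip_rstrip_ne_nil t h
          have hdd : pvRstrip (pvG t false) = pvDD (pvLstrip (pvRstrip t)) := by
            rw [← ih.1, pvStrip_comm]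
          have hddne : pvRstrip (pvG t false) ≠ [] := by
            rw [hdd]
            cases hu : pvLstrip (pvRstrip t) with
            | nil => exact absurd hu hne
            | cons a u => exact pvDD_ne_nil a u
          rw [if_neg (by simp [h]), if_neg (by simp [hddne])]
          rw [pvLemL (pvRstrip t) hne, hdd]
    · have hl : pvLstrip (c :: t) = c :: t := by simp [pvLstrip, List.dropWhile, pvIsD, hc]
      have hg : ∀ b, pvG (c :: t) b = c :: pvG t true := by intro b; simp [pvG, hc]
      have key : pvDD (pvRstrip (c :: t)) = pvRstrip (c :: pvG t true) := by
        rw [pvRstrip_cons, if_neg (by simp [hc]), pvDD_cons_ne c _ hc, ih.2,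
            pvRstrip_cons, if_neg (by simp [hc])]
      exact ⟨by rw [hl, hg, key], by rw [hg, key]⟩

theorem pvDD_dash_dash (t : List Char) : pvDD ('-' :: '-' :: t) = pvDD ('-' :: t) := by
  simp [pvDD]

theorem pvDD_repDD_pair (v : List Char) :
    pvDD (pvRepDD v) = pvDD v ∧ pvDD ('-' :: pvRepDD v) = pvDD ('-' :: v) := by
  fun_induction pvRepDD v with
  | case1 t ih =>
    have hA : pvDD (pvRepDD ('-' :: '-' :: t)) = pvDD ('-' :: '-' :: t) := by
      show pvDD ('-' :: pvRepDD t) = pvDD ('-' :: '-' :: t)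
      rw [ih.2]; exact (pvDD_dash_dash t).symm
    refine ⟨hA, ?_⟩
    show pvDD ('-' :: '-' :: pvRepDD t) = pvDD ('-' :: '-' :: '-' :: t)
    rw [pvDD_dash_dash, pvDD_dash_dash, ih.2]
    exact (pvDD_dash_dash t).symm
  | case2 c t hne ih =>
    have hA : pvDD (c :: pvRepDD t) = pvDD (c :: t) := by
      by_cases hc : c = '-'
      · subst hc; exact ih.2
      · rw [pvDD_cons_ne c _ hc, pvDD_cons_ne c _ hc, ih.1]
    refine ⟨hA, ?_⟩
    by_cases hc : c = '-'
    · subst hc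
      rw [pvDD_dash_dash, pvDD_dash_dash]
      exact ih.2
    · have houter : ∀ u, pvDD ('-' :: c :: u) = '-' :: pvDD (c :: u) := by
        intro u; simp [pvDD, hc]
      rw [houter, houter, pvDD_cons_ne c _ hc, pvDD_cons_ne c _ hc, ih.1]
  | case3 => exact ⟨rfl, rfl⟩

theorem pvDD_of_no_hasDD (v : List Char) (h : pvHasDD v = false) : pvDD v = v := by
  fun_induction pvHasDD v with
  | case1 t => simp at h
  | case2 c t hne ih =>
    cases t with
    | nil => rfl
    | cons d t' =>
      have hnd : ¬ (c = '-' ∧ d = '-') := by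
        intro hxy
        exact hne t' hxy.1 (by rw [hxy.2])
      rw [show pvDD (c :: d :: t') = c :: pvDD (d :: t') by simp [pvDD, hnd], ih h]
  | case3 => rfl

theorem pvCollapseLoop_eq (v : List Char) : pvCollapseLoop v = pvDD v := by
  fun_induction pvCollapseLoop v with
  | case1 v h ih => rw [ih, (pvDD_repDD_pair v).1]
  | case2 v h => rw [pvDD_of_no_hasDD v (by simpa using h)]

theorem pvMain (s : List Char) :
    pvCollapseLoop (PySem.Chars.stripChars (pvFoldA [] s) ['-']) =
    PySem.Chars.stripChars (pvFoldB [] s) ['-'] := by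
  rw [pvFoldA_eq, pvFoldB_eq]
  simp only [List.nil_append, pvStripChars_eq, pvCollapseLoop_eq]
  have hflag : pvFlag ([] : List Char) = false := rfl
  rw [hflag, (pvPQ (pvMapA s)).1, pvG_false_no_lead']

-- ===== VERDICT (by name: the statement is the Claim_ definition above) =====
theorem normalize_channel_name_py_spec : Claim_equal_normalize_channel_name_py := by
  intro name _
  unfold Spec_normalize_channel_name_py normalize_channel_name_py normalize_channel_name_py_alt
  simp only [pvMain]
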